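-- pv_equiv track=rewrite | github.com/JudgeSansDredd/scripts | gameprobability/AtomicHighway.py | addSkill
-- ===== SOURCE A (Python) =====
-- def addSkill(diceRoll, skillScore):
--     newDiceRoll = []
--     for die in diceRoll:
--         modified = die + skillScore
--         skillScore = modified - 6 if modified > 6 else 0
--         modified = 6 if modified > 6 else modified
--         newDiceRoll.append(modified)
--     return newDiceRoll
-- ===== SOURCE B (Python) =====
-- def addSkill(diceRoll, skillScore):
--     # Two-pass: build the table of incoming carries, then map to capped dice.
--     carries = [skillScore]
--     for die in diceRoll:
--         carries.append(max(carries[-1] + die - 6, 0))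
--     return [min(die + c, 6) for die, c in zip(diceRoll, carries)]
-- ===== Notes on version B (the rewrite author's own statement) =====
-- stated objective: alternative
-- what changed: Replaces the single stateful loop (mutating skillScore and appending capped values) with a two-pass decomposition: a prefix-scan building the table of incoming carries max(c+d-6,0), then a zip comprehension mapping each die and its carry to min(die+carry,6).
import Mathlib
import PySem

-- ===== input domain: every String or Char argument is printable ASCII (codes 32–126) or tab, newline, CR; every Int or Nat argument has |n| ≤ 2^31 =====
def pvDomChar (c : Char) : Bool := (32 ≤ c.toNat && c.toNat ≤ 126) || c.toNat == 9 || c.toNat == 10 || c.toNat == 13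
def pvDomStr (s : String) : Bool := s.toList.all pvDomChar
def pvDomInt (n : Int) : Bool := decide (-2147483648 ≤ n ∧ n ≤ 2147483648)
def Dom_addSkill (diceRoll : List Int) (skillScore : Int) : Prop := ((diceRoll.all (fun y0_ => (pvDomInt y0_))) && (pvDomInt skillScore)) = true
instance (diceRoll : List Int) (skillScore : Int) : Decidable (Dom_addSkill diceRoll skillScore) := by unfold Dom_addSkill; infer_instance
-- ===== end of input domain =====

-- B replaces A's single stateful loop by a carry-table prefix scan plus a zip-map pass (alternative decomposition, same O(n) cost).


-- ===== PORT A =====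
-- Single stateful loop: carry is threaded, each die appended capped at 6.
def addSkillGo : List Int → Int → List Int
  | [], _ => []
  | die :: ds, skillScore =>
    let modified := die + skillScore
    (if modified > 6 then 6 else modified) ::
      addSkillGo ds (if modified > 6 then modified - 6 else 0)

def addSkill (diceRoll : List Int) (skillScore : Int) : List Int :=
  addSkillGo diceRoll skillScore

-- ===== PORT B =====
-- B: first pass builds the table of incoming carries, second pass zips and caps.
def carryTable : List Int → Int → List Int
  | [], c => [c]
  | die :: ds, c => c :: carryTable ds (max (c + die - 6) 0)

def addSkill_alt (diceRoll : List Int) (skillScore : Int) : List Int :=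
  (diceRoll.zip (carryTable diceRoll skillScore)).map (fun p => min (p.1 + p.2) 6)

-- ===== PRECONDITION & SPEC =====
def Spec_addSkill (diceRoll : List Int) (skillScore : Int) (out : List Int) : Prop := out = addSkill_alt diceRoll skillScore
instance (diceRoll : List Int) (skillScore : Int) (out : List Int) : Decidable (Spec_addSkill diceRoll skillScore out) := by unfold Spec_addSkill; infer_instance

-- ===== CLAIM (what is proved, stated in full; the proofs are below) =====
def Claim_equal_addSkill : Prop := ∀ (diceRoll : List Int) (skillScore : Int), Dom_addSkill diceRoll skillScore → Spec_addSkill diceRoll skillScore (addSkill diceRoll skillScore)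

-- ===== LEMMAS AND PROOFS =====

-- ===== VERDICT (by name: the statement is the Claim_ definition above) =====
theorem addSkillGo_eq_alt (ds : List Int) (s : Int) :
    addSkillGo ds s = (ds.zip (carryTable ds s)).map (fun p => min (p.1 + p.2) 6) := by
  induction ds generalizing s with
  | nil => simp [addSkillGo, carryTable]
  | cons d ds ih =>
    simp only [addSkillGo, carryTable, List.zip_cons_cons, List.map_cons]
    have h1 : (if d + s > 6 then (6 : Int) else d + s) = min (d + s) 6 := by
      split_ifs <;> omega
    have h2 : (if d + s > 6 then d + s - 6 else 0) = max (s + d - 6) 0 := by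
      split_ifs <;> omega
    rw [h1, ih, h2]

theorem addSkill_spec : Claim_equal_addSkill := by
  intro ds s _
  unfold Spec_addSkill addSkill addSkill_alt
  exact addSkillGo_eq_alt ds s
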